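-- pv_equiv track=rewrite | github.com/YeskendirK/CtCI-6th | Chapter 5. Bit Manipulation/flip_bit_to_win.py | flip_bit
-- ===== SOURCE A (Python) =====
-- def flip_bit(n):
--     max_seq = 1
--     prev_seq = 0
--     current_seq = 0
--     i = n.bit_length()
--     while i >= 0:
--         if n & 1 == 1:
--             current_seq += 1
--         elif n & 1 == 0:
--             prev_seq = 0 if n & 2 == 0 else current_seq
--             current_seq = 0
--         max_seq = max(max_seq, prev_seq + 1 + current_seq)
--         n = n >> 1
--         i -= 1
--     return max_seq
-- ===== SOURCE B (Python) =====
-- def flip_bit(n):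
--     # Run-length decomposition: extract the same bit window A scans, compress it
--     # into (bit, length) runs, then take the best over runs of ones (merging two
--     # ones-runs across a single-zero gap).
--     bits = [(n >> k) & 1 for k in range(n.bit_length() + 1)]
--     rle = []
--     for b in bits:
--         if rle and rle[-1][0] == b:
--             rle[-1] = (b, rle[-1][1] + 1)
--         else:
--             rle.append((b, 1))
--     best = 1
--     prev = 0
--     last_ones = 0
--     for b, ln in rle:
--         if b == 1:
--             best = max(best, prev + 1 + ln)
--             last_ones = ln
--         else:
--             prev = last_ones if ln == 1 else 0
--     return best
-- ===== Notes on version B (the rewrite author's own statement) =====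
-- stated objective: alternative
-- what changed: A is a single stateful bit-scan with a one-bit lookahead deciding a merge at every step; B decomposes the problem: it extracts the bit window once, compresses it into a run-length encoding, and then takes the maximum over runs of ones, merging two adjacent runs across a single-zero gap.
import Mathlib
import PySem

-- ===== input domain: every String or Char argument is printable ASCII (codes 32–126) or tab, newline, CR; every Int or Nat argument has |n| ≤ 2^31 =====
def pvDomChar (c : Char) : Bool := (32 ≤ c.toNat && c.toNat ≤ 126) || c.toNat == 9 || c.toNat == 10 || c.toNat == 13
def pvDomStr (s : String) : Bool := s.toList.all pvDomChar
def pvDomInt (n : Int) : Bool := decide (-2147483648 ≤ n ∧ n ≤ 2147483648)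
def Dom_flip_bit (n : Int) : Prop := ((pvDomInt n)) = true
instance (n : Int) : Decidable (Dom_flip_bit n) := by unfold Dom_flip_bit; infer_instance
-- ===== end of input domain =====

-- B replaces A's stateful lookahead bit-scan by a run-length decomposition of the
-- same bit window (alternative decomposition, same cost).

-- ===== PORT A =====
-- A's while loop runs exactly n.bit_length()+1 times (i counts down independently
-- of the updates to n); the countdown is ported as Nat fuel.
def pvLoopA : Int → Nat → Int → Int → Int → Int
  | _, 0, m, _, _ => m
  | n, k + 1, m, p, c =>
    if PySem.Int.band n 1 = 1 then
      pvLoopA (n >>> (1 : Nat)) k (max m (p + 1 + (c + 1))) p (c + 1)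
    else if PySem.Int.band n 1 = 0 then
      pvLoopA (n >>> (1 : Nat)) k
        (max m ((if PySem.Int.band n 2 = 0 then 0 else c) + 1 + 0))
        (if PySem.Int.band n 2 = 0 then 0 else c) 0
    else  -- unreachable: n & 1 is 0 or 1; Python's elif chain falls through keeping state
      pvLoopA (n >>> (1 : Nat)) k (max m (p + 1 + c)) p c

def flip_bit (n : Int) : Int := pvLoopA n (PySem.Int.bitLength n + 1) 1 0 0

-- ===== PORT B =====
-- one step of Source B's run-length-encoding loop (`rle[-1] = (b, rle[-1][1]+1)` / append)
def pvRleStep (acc : List (Int × Int)) (b : Int) : List (Int × Int) :=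
  match acc.getLast? with
  | some (b0, c) => if b0 = b then acc.dropLast ++ [(b, c + 1)] else acc ++ [(b, 1)]
  | none => acc ++ [(b, 1)]

-- one step of Source B's scan over the runs, state (best, prev, last_ones)
def pvScanStep (st : Int × Int × Int) (r : Int × Int) : Int × Int × Int :=
  if r.1 = 1 then (max st.1 (st.2.1 + 1 + r.2), st.2.1, r.2)
  else (st.1, if r.2 = 1 then st.2.2 else 0, st.2.2)

def flip_bit_alt (n : Int) : Int :=
  -- bits = [(n >> k) & 1 for k in range(n.bit_length() + 1)]
  let bits := (List.range (PySem.Int.bitLength n + 1)).map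
    (fun k : Nat => PySem.Int.band (n >>> k) 1)
  let rle := bits.foldl pvRleStep []
  (rle.foldl pvScanStep (1, 0, 0)).1

-- ===== PRECONDITION & SPEC =====
def Spec_flip_bit (n : Int) (out : Int) : Prop := out = flip_bit_alt n
instance (n : Int) (out : Int) : Decidable (Spec_flip_bit n out) := by unfold Spec_flip_bit; infer_instance

-- ===== CLAIM (what is proved, stated in full; the proofs are below) =====
def Claim_equal_flip_bit : Prop := ∀ (n : Int), Dom_flip_bit n → Spec_flip_bit n (flip_bit n)

-- ===== LEMMAS AND PROOFS =====

-- the low k bits of n, LSB first (abstract view shared by both proofs)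
def pvBits : Int → Nat → List Int
  | _, 0 => []
  | n, k + 1 => PySem.Int.band n 1 :: pvBits (n >>> (1 : Nat)) k

def pvHead : List Int → Int
  | [] => 0
  | y :: _ => y

-- A's loop re-read as a loop over the bit list (lookahead = head of the tail)
def pvLoopL : List Int → Int → Int → Int → Int
  | [], m, _, _ => m
  | b :: t, m, p, c =>
    if b = 1 then pvLoopL t (max m (p + 1 + (c + 1))) p (c + 1)
    else pvLoopL t (max m ((if pvHead t = 1 then c else 0) + 1 + 0))
          (if pvHead t = 1 then c else 0) 0

-- head-recursive specification of Source B's RLE-building fold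
def pvMergeRLE : Int → Int → List Int → List (Int × Int)
  | b, ln, [] => [(b, ln)]
  | b, ln, x :: t => if x = b then pvMergeRLE b (ln + 1) t else (b, ln) :: pvMergeRLE x 1 t

lemma pvLoopL_one (t : List Int) (m p c : Int) :
    pvLoopL (1 :: t) m p c = pvLoopL t (max m (p + 1 + (c + 1))) p (c + 1) := by
  simp [pvLoopL]

lemma pvLoopL_zero (t : List Int) (m p c : Int) :
    pvLoopL (0 :: t) m p c
      = pvLoopL t (max m ((if pvHead t = 1 then c else 0) + 1 + 0))
          (if pvHead t = 1 then c else 0) 0 := by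
  norm_num [pvLoopL]

lemma pvMergeRLE_same (b ln : Int) (t : List Int) :
    pvMergeRLE b ln (b :: t) = pvMergeRLE b (ln + 1) t := by
  simp [pvMergeRLE]

lemma pvMergeRLE_diff {x b : Int} (h : x ≠ b) (ln : Int) (t : List Int) :
    pvMergeRLE b ln (x :: t) = (b, ln) :: pvMergeRLE x 1 t := by
  simp [pvMergeRLE, h]

lemma pvScan_one (best prev lastones ln : Int) :
    pvScanStep (best, prev, lastones) (1, ln) = (max best (prev + 1 + ln), prev, ln) := by
  simp [pvScanStep]

lemma pvScan_zero (best prev lastones ln : Int) :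
    pvScanStep (best, prev, lastones) (0, ln)
      = (best, (if ln = 1 then lastones else 0), lastones) := by
  norm_num [pvScanStep]

lemma pv_shift1 (n : Int) : n >>> (1 : Nat) = n / 2 := by
  simpa using Int.shiftRight_eq_div_pow n 1

lemma pv_band_one (n : Int) : PySem.Int.band n 1 = n % 2 := by
  rw [PySem.Int.band_one, PySem.Int.mod_eq_emod_of_pos (by norm_num)]

lemma pv_nat_and_two (m : Nat) : m &&& 2 = 2 * (m / 2 % 2) := by
  have h := Nat.and_two_pow m 1
  rw [Nat.testBit, Nat.shiftRight_succ, Nat.shiftRight_zero] at h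
  rcases Nat.mod_two_eq_zero_or_one (m / 2) with h2 | h2 <;> simp [h2] at h <;> omega

lemma pv_band_two (n : Int) : PySem.Int.band n 2 = 2 * (n / 2 % 2) := by
  unfold PySem.Int.band
  by_cases hn : 0 ≤ n
  · rw [if_pos hn, if_pos (by norm_num)]
    have h := pv_nat_and_two n.toNat
    simp only [show ((2 : Int).toNat) = 2 from rfl]
    omega
  · rw [if_neg hn, if_pos (by norm_num)]
    have h := pv_nat_and_two (-n - 1).toNat
    have hc : (2 : Nat) &&& (-n - 1).toNat = (-n - 1).toNat &&& 2 := Nat.and_comm _ _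
    simp only [show ((2 : Int).toNat) = 2 from rfl]
    omega

lemma pv_bits_map (k : Nat) : ∀ n : Int,
    (List.range k).map (fun i : Nat => PySem.Int.band (n >>> i) 1) = pvBits n k := by
  induction k with
  | zero => intro n; simp [pvBits]
  | succ j ih =>
    intro n
    rw [List.range_succ_eq_map, List.map_cons, List.map_map]
    have hshift : ∀ i : Nat, n >>> (i + 1) = (n >>> (1 : Nat)) >>> i := by
      intro i
      rw [Nat.add_comm i 1, Int.shiftRight_add]
    simp only [pvBits]
    congr 1
    · cases n <;> rfl
    · rw [← ih (n >>> (1 : Nat))]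
      apply List.map_congr_left
      intro i _
      simp only [Function.comp_apply, Nat.succ_eq_add_one, hshift i]

lemma pv_bits_mem (k : Nat) : ∀ (n : Int) (x : Int), x ∈ pvBits n k → x = 0 ∨ x = 1 := by
  induction k with
  | zero => intro n x hx; simp [pvBits] at hx
  | succ j ih =>
    intro n x hx
    simp only [pvBits, List.mem_cons] at hx
    rcases hx with hx | hx
    · rw [hx, pv_band_one]; omega
    · exact ih _ _ hx

-- Step 1: A's port equals the bit-list loop, for n inside the window's range.
lemma pv_loopA_eq_loopL (k : Nat) : ∀ (n m p c : Int),
    (0 ≤ n → n < 2 ^ k) → (n < 0 → -((2 : Int) ^ (k - 1)) ≤ n) →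
    pvLoopA n k m p c = pvLoopL (pvBits n k) m p c := by
  induction k with
  | zero => intro n m p c _ _; rfl
  | succ j ih =>
    intro n m p c h1 h2
    have hps : (2 : Int) ^ (j + 1) = 2 ^ j * 2 := pow_succ 2 j
    have hpp : (0 : Int) < 2 ^ j := by positivity
    have h1' : 0 ≤ n >>> (1 : Nat) → n >>> (1 : Nat) < 2 ^ j := by
      rw [pv_shift1]; intro h; by_cases hn : 0 ≤ n
      · have := h1 hn; omega
      · omega
    have h2' : n >>> (1 : Nat) < 0 → -((2 : Int) ^ (j - 1)) ≤ n >>> (1 : Nat) := by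
      rw [pv_shift1]; intro h
      have hn : n < 0 := by omega
      have hb := h2 hn
      cases j with
      | zero => simp only [Nat.zero_sub, pow_zero] at hb ⊢; omega
      | succ i =>
        have hps2 : (2 : Int) ^ (i + 1) = 2 ^ i * 2 := pow_succ 2 i
        simp only [Nat.add_sub_cancel] at hb ⊢
        have hip : (0 : Int) < 2 ^ i := by positivity
        omega
    have hb1 := pv_band_one n
    have hshape : pvBits n (j + 1) = PySem.Int.band n 1 :: pvBits (n >>> (1 : Nat)) j := rfl
    rcases Int.emod_two_eq_zero_or_one n with hr | hr
    · -- current bit 0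
      rw [hshape, hb1, hr, pvLoopL_zero]
      show (if PySem.Int.band n 1 = 1 then _ else _) = _
      rw [hb1, hr, if_neg (by norm_num), if_pos rfl]
      have hhead : (if PySem.Int.band n 2 = 0 then (0 : Int) else c)
          = (if pvHead (pvBits (n >>> (1 : Nat)) j) = 1 then c else 0) := by
        cases j with
        | zero =>
          have hn1 : n = 0 := by
            by_cases hn : 0 ≤ n
            · have := h1 hn; simp only at this; omega
            · have := h2 (by omega); simp only at this; omega
          subst hn1
          norm_num [pvBits, pvHead, pv_band_two]
        | succ i =>
          have : pvHead (pvBits (n >>> (1 : Nat)) (i + 1)) = PySem.Int.band (n >>> (1 : Nat)) 1 := rfl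
          rw [this, pv_band_one, pv_shift1, pv_band_two]
          rcases Int.emod_two_eq_zero_or_one (n / 2) with hq | hq <;> rw [hq] <;> norm_num
      rw [hhead]
      exact ih _ _ _ _ h1' h2'
    · -- current bit 1
      rw [hshape, hb1, hr, pvLoopL_one]
      show (if PySem.Int.band n 1 = 1 then _ else _) = _
      rw [hb1, hr, if_pos rfl]
      exact ih _ _ _ _ h1' h2'

-- Source B's end-appending RLE fold builds exactly pvMergeRLE.
lemma pv_fold_rle (bits : List Int) : ∀ (acc : List (Int × Int)) (b ln : Int),
    List.foldl pvRleStep (acc ++ [(b, ln)]) bits = acc ++ pvMergeRLE b ln bits := by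
  induction bits with
  | nil => intro acc b ln; simp [pvMergeRLE]
  | cons x t ih =>
    intro acc b ln
    simp only [List.foldl_cons, pvRleStep, List.getLast?_concat]
    by_cases hxb : b = x
    · subst hxb
      rw [if_pos rfl, List.dropLast_concat, ih acc b (ln + 1), pvMergeRLE_same]
    · rw [if_neg hxb, ih (acc ++ [(b, ln)]) x 1, pvMergeRLE_diff (fun h => hxb h.symm)]
      simp

-- Step 2: the bit-list loop equals the run scan, under the loop/scan state invariant.
lemma pv_inv (rem : List Int) : ∀ (ln best prev lastones : Int),
    (∀ x ∈ rem, x = 0 ∨ x = 1) → 1 ≤ best → 1 ≤ ln → 0 ≤ prev → 0 ≤ lastones →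
    (pvLoopL rem (max best (prev + 1 + ln)) prev ln
        = (List.foldl pvScanStep (best, prev, lastones) (pvMergeRLE 1 ln rem)).1)
  ∧ (pvLoopL rem best (if ln = 1 ∧ pvHead rem = 1 then lastones else 0) 0
        = (List.foldl pvScanStep (best, prev, lastones) (pvMergeRLE 0 ln rem)).1) := by
  induction rem with
  | nil =>
    intro ln best prev lastones _ hb hl hp hlo
    constructor
    · show max best (prev + 1 + ln)
        = (List.foldl pvScanStep (best, prev, lastones) [(1, ln)]).1
      rw [List.foldl_cons, pvScan_one, List.foldl_nil]
    · show best = (List.foldl pvScanStep (best, prev, lastones) [(0, ln)]).1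
      rw [List.foldl_cons, pvScan_zero, List.foldl_nil]
  | cons x t ih =>
    intro ln best prev lastones hmem hb hl hp hlo
    have hx : x = 0 ∨ x = 1 := hmem x (by simp)
    have hmem' : ∀ y ∈ t, y = 0 ∨ y = 1 := fun y hy => hmem y (by simp [hy])
    constructor
    · -- currently inside a run of ones of length ln
      rcases hx with hx | hx <;> subst hx
      · -- next bit 0: the ones-run closes
        rw [pvLoopL_zero, pvMergeRLE_diff (by norm_num), List.foldl_cons, pvScan_one]
        have := (ih 1 (max best (prev + 1 + ln)) prev ln hmem'
          (by omega) (by omega) hp (by omega)).2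
        simp only [true_and] at this
        rw [← this]
        congr 1; by_cases ht : pvHead t = 1 <;> simp [ht] <;> omega
      · -- next bit 1: the run grows
        rw [pvLoopL_one, pvMergeRLE_same]
        have := (ih (ln + 1) best prev lastones hmem' hb (by omega) hp hlo).1
        rw [← this]
        congr 1; omega
    · -- currently inside a run of zeros
      rcases hx with hx | hx <;> subst hx
      · -- next bit 0: the zero-run grows
        have hp0 : (if ln = 1 ∧ pvHead ((0 : Int) :: t) = 1 then lastones else 0) = 0 := by
          rw [if_neg]; rintro ⟨_, h⟩; norm_num [pvHead] at h
        rw [hp0, pvLoopL_zero, pvMergeRLE_same]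
        have hite : (if pvHead t = 1 then (0 : Int) else 0) = 0 := ite_self 0
        rw [hite]
        have hm : max best (0 + 1 + 0) = best := by omega
        rw [hm]
        have := (ih (ln + 1) best prev lastones hmem' hb (by omega) hp hlo).2
        rw [if_neg (by rintro ⟨h, _⟩; omega)] at this
        exact this
      · -- next bit 1: the zero-run closes; a gap of exactly one zero merges
        have hp0 : (if ln = 1 ∧ pvHead ((1 : Int) :: t) = 1 then lastones else 0)
            = (if ln = 1 then lastones else 0) := by
          have : pvHead ((1 : Int) :: t) = 1 := rfl
          simp [this]
        rw [hp0, pvLoopL_one, pvMergeRLE_diff (by norm_num), List.foldl_cons, pvScan_zero]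
        have := (ih 1 best (if ln = 1 then lastones else 0) lastones hmem'
          hb (by omega) (by by_cases h : ln = 1 <;> simp [h, hlo]) hlo).1
        rw [← this]
        congr 1

-- range of n inside its own bit window
lemma pv_range_hi (n : Int) : 0 ≤ n → n < 2 ^ (PySem.Int.bitLength n + 1) := by
  intro hn
  have h := PySem.Int.lt_two_pow_bitLength n
  have hcast : (((2 : Nat) ^ PySem.Int.bitLength n : Nat) : Int) = (2 : Int) ^ PySem.Int.bitLength n := by
    push_cast; ring
  have h2 : (2 : Int) ^ (PySem.Int.bitLength n + 1) = 2 ^ PySem.Int.bitLength n * 2 :=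
    pow_succ 2 _
  omega

lemma pv_range_lo (n : Int) : n < 0 → -((2 : Int) ^ (PySem.Int.bitLength n + 1 - 1)) ≤ n := by
  intro hn
  have h := PySem.Int.lt_two_pow_bitLength n
  have hcast : (((2 : Nat) ^ PySem.Int.bitLength n : Nat) : Int) = (2 : Int) ^ PySem.Int.bitLength n := by
    push_cast; ring
  simp only [Nat.add_sub_cancel]
  omega

-- ===== VERDICT (by name: the statement is the Claim_ definition above) =====
theorem flip_bit_spec : Claim_equal_flip_bit := by
  intro n _
  unfold Spec_flip_bit
  have ha : flip_bit n = pvLoopA n (PySem.Int.bitLength n + 1) 1 0 0 := rfl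
  have halt : flip_bit_alt n
      = (List.foldl pvScanStep (1, 0, 0) (List.foldl pvRleStep []
          ((List.range (PySem.Int.bitLength n + 1)).map
            (fun i : Nat => PySem.Int.band (n >>> i) 1)))).1 := rfl
  rw [ha, halt, pv_bits_map, pv_loopA_eq_loopL _ n 1 0 0 (pv_range_hi n) (pv_range_lo n)]
  have hmem := pv_bits_mem (PySem.Int.bitLength n) (n >>> (1 : Nat))
  have hshape : pvBits n (PySem.Int.bitLength n + 1)
      = PySem.Int.band n 1 :: pvBits (n >>> (1 : Nat)) (PySem.Int.bitLength n) := rfl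
  have hrle : List.foldl pvRleStep [] (pvBits n (PySem.Int.bitLength n + 1))
      = pvMergeRLE (PySem.Int.band n 1) 1 (pvBits (n >>> (1 : Nat)) (PySem.Int.bitLength n)) := by
    rw [hshape, List.foldl_cons]
    have hstep : pvRleStep [] (PySem.Int.band n 1) = [] ++ [(PySem.Int.band n 1, 1)] := rfl
    rw [hstep, pv_fold_rle _ [] _ 1, List.nil_append]
  rw [hrle, hshape]
  have hb1 := pv_band_one n
  rcases Int.emod_two_eq_zero_or_one n with hr | hr <;> rw [hb1, hr]
  · -- first bit 0
    rw [pvLoopL_zero]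
    have hite : (if pvHead (pvBits (n >>> (1 : Nat)) (PySem.Int.bitLength n)) = 1
        then (0 : Int) else 0) = 0 := ite_self 0
    rw [hite]
    have hm : max 1 ((0 : Int) + 1 + 0) = 1 := by omega
    rw [hm]
    have := (pv_inv _ 1 1 0 0 hmem (by omega) (by omega) (by omega) (by omega)).2
    rw [ite_self] at this
    exact this
  · -- first bit 1
    rw [pvLoopL_one]
    have hm : max 1 ((0 : Int) + 1 + (0 + 1)) = max 1 (0 + 1 + 1) := by omega
    rw [hm]
    exact (pv_inv _ 1 1 0 0 hmem (by omega) (by omega) (by omega) (by omega)).1
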